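-- pv_equiv track=rewrite | github.com/aryapunni/C | cs50/week6-Python/dna_jyothisettan/dna.py | pattern_find
-- ===== SOURCE A (Python) =====
-- def pattern_find(sequence, pat):
--     """
--     Finds the maximum number of times that pattern `pat' appears in `sequence'
--     Inputs:
--      sequence: a string representing the DNA sequence of an unknown person.
--      pat: the pattern we have to search for
--     Returns:
--      the largest number of times that the `pat' appears in `sequence'
--     """
--
--     pat_len = len(pat)
--     idx = 0
--     count = 0
--     max_count = 0
--
--     while True:
--         next_idx = sequence.find(pat, idx)
--
--         if next_idx == idx:
--             # The pattern repeats at idx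
--             count += 1
--             idx += pat_len
--
--         elif next_idx == -1:
--             if count > max_count:
--                 max_count = count
--             break
--
--         else:
--             if count > max_count:
--                 max_count = count
--
--             count = 1
--             idx = next_idx + pat_len
--
--     return max_count
-- ===== SOURCE B (Python) =====
-- def pattern_find(sequence, pat):
--     """Max number of back-to-back copies of `pat` counted by the same greedy
--     left-to-right scan as A, but driven by a precomputed list of all match
--     positions instead of repeated str.find calls."""
--     L = len(pat)
--     occs = [i for i in range(len(sequence) - L + 1) if sequence[i:i+L] == pat]
--     best = 0
--     count = 0
--     end = 0
--     for o in occs: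
--         if o < end:
--             continue  # overlapped by an already-consumed copy
--         if o == end:
--             count += 1
--         else:
--             best = max(best, count)
--             count = 1
--         end = o + L
--     return max(best, count)
-- ===== Notes on version B (the rewrite author's own statement) =====
-- stated objective: alternative
-- what changed: B precomputes the list of all match positions once by direct slice comparisons and replays the greedy non-overlapping scan in a single fold over that list, eliminating A's repeated str.find calls; Pre_ excludes pat == '' (A loops forever there).
import Mathlib
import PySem

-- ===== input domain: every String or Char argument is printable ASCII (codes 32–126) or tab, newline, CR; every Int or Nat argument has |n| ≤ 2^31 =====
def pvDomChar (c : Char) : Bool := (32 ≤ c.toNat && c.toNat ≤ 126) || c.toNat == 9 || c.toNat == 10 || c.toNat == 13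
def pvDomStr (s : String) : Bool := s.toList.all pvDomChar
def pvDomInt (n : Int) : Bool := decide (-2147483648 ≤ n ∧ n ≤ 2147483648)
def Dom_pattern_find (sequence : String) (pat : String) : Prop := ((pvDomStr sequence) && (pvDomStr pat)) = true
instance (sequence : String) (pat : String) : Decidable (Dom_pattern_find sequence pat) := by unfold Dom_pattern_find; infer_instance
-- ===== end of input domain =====

-- B replaces A's repeated str.find scanning by a precomputed list of all match positions
-- folded once by the same greedy non-overlapping count (alternative structure, same cost);
-- Pre_ excludes pat = "" on which A loops forever.


-- ===== PORT A =====
-- A's 'while True' loop; fuel only makes it total (under Pre_ the fuel never runs out: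
-- idx grows by pat_len ≥ 1 each iteration and stays ≤ len(sequence)).
def pattern_find_loopA (sequence : String) (pat : String) (patLen : Int) :
    Nat → Int → Int → Int → Int
  | 0, _, _, maxc => maxc
  | fuel + 1, idx, count, maxc =>
    let next_idx := PySem.Str.findFrom sequence pat idx none
    if next_idx = idx then
      pattern_find_loopA sequence pat patLen fuel (idx + patLen) (count + 1) maxc
    else if next_idx = -1 then
      (if count > maxc then count else maxc)
    else
      pattern_find_loopA sequence pat patLen fuel (next_idx + patLen) 1
        (if count > maxc then count else maxc)

def pattern_find (sequence : String) (pat : String) : Int :=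
  pattern_find_loopA sequence pat (PySem.Str.len pat)
    ((PySem.Str.len sequence).toNat + 2) 0 0 0

-- ===== PORT B =====
-- the comprehension [i for i in range(len(sequence)-L+1) if sequence[i:i+L] == pat]
def pattern_find_occs (sequence : String) (pat : String) : List Int :=
  (PySem.List.pyRange 0 (PySem.Str.len sequence - PySem.Str.len pat + 1) 1).filter
    (fun i => PySem.Chars.slice sequence.toList (some i) (some (i + PySem.Str.len pat)) == pat.toList)

-- the 'for o in occs' loop with state (best, count, end)
def pattern_find_loopB (L : Int) : List Int → Int → Int → Int → Int
  | [], best, count, _ => max best count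
  | o :: rest, best, count, e =>
    if o < e then pattern_find_loopB L rest best count e
    else if o = e then pattern_find_loopB L rest best (count + 1) (o + L)
    else pattern_find_loopB L rest (max best count) 1 (o + L)

def pattern_find_alt (sequence : String) (pat : String) : Int :=
  pattern_find_loopB (PySem.Str.len pat) (pattern_find_occs sequence pat) 0 0 0

-- ===== PRECONDITION & SPEC =====
-- Pre_ excludes exactly pat = "": there A's while-loop never terminates (sequence.find('', idx)
-- always returns idx), so A returns on no such input.
def Pre_pattern_find (sequence : String) (pat : String) : Prop := pat ≠ ""
instance (sequence : String) (pat : String) : Decidable (Pre_pattern_find sequence pat) := by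
  unfold Pre_pattern_find; infer_instance

def pvWitness_pattern_find : String × String := ("AGATCAGATCTTAGATC", "AGATC")

def Spec_pattern_find (sequence : String) (pat : String) (out : Int) : Prop := out = pattern_find_alt sequence pat
instance (sequence : String) (pat : String) (out : Int) : Decidable (Spec_pattern_find sequence pat out) := by unfold Spec_pattern_find; infer_instance

-- ===== CLAIM (what is proved, stated in full; the proofs are below) =====
def Claim_equal_pattern_find : Prop := ∀ (sequence : String) (pat : String), Dom_pattern_find sequence pat → Pre_pattern_find sequence pat → Spec_pattern_find sequence pat (pattern_find sequence pat)

-- ===== LEMMAS AND PROOFS =====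

-- membership in B's occurrence list
lemma mem_occs_iff (sequence pat : String) (o : Int) :
    o ∈ pattern_find_occs sequence pat ↔
      ∃ j : Nat, o = (j : Int) ∧ pat.toList <+: sequence.toList.drop j ∧
        j + pat.toList.length ≤ sequence.toList.length := by
  unfold pattern_find_occs
  simp only [List.mem_filter, PySem.List.mem_pyRange_one, PySem.Str.len_eq,
    PySem.Chars.slice_eq_listSlice, beq_iff_eq]
  constructor
  · rintro ⟨⟨h0, hlt⟩, hs⟩
    lift o to ℕ using h0 with j
    rw [PySem.List.slice_natCast_add] at hs
    refine ⟨j, rfl, ?_, by omega⟩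
    rw [List.prefix_iff_eq_take]
    have hlen : j + pat.toList.length ≤ sequence.toList.length := by omega
    calc pat.toList = List.take pat.toList.length (List.drop j sequence.toList) := by
          rw [hs]
      _ = _ := by rw [hs]
  · rintro ⟨j, rfl, hpre, hle⟩
    have hs : List.take pat.toList.length (List.drop j sequence.toList) = pat.toList :=
      (List.prefix_iff_eq_take.mp hpre).symm
    exact ⟨⟨by positivity, by omega⟩, by rw [PySem.List.slice_natCast_add]; exact hs⟩

-- B's occurrence list is strictly increasing
lemma occs_pairwise (sequence pat : String) :
    (pattern_find_occs sequence pat).Pairwise (· < ·) := by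
  unfold pattern_find_occs
  exact (PySem.List.pairwise_lt_pyRange_one _ _).filter _

-- find(pat, idx) returns -1 iff no occurrence at or after idx
lemma findFrom_eq_neg_one (sequence pat : String) (hp : pat.toList ≠ []) (idx : Nat)
    (hidx : idx ≤ sequence.toList.length)
    (h : (pattern_find_occs sequence pat).filter (fun o => decide ((idx : Int) ≤ o)) = []) :
    PySem.Chars.findFrom sequence.toList pat.toList (idx : Int) none = -1 := by
  rw [PySem.Chars.findFrom_natCast_eq_neg_one_iff _ _ idx hidx]
  intro hinf
  obtain ⟨j, hj⟩ := (PySem.Chars.exists_prefix_drop_iff_isIn pat.toList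
    (sequence.toList.drop idx)).mpr ((PySem.Chars.isIn_iff_infix _ _).mpr hinf)
  rw [List.drop_drop] at hj
  have hlen : pat.toList.length ≤ sequence.toList.length - (idx + j) := by
    simpa using hj.length_le
  have hplen : 1 ≤ pat.toList.length := by
    cases hq : pat.toList with
    | nil => exact absurd hq hp
    | cons a l => simp [hq]
  have hmem : ((idx + j : Nat) : Int) ∈ pattern_find_occs sequence pat := by
    rw [mem_occs_iff]
    exact ⟨idx + j, rfl, hj, by omega⟩
  have : ((idx + j : Nat) : Int) ∈
      (pattern_find_occs sequence pat).filter (fun o => decide ((idx : Int) ≤ o)) := by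
    rw [List.mem_filter]
    exact ⟨hmem, by simp⟩
  rw [h] at this
  simp at this

-- find(pat, idx) returns the head of the filtered occurrence list
lemma findFrom_eq_head (sequence pat : String) (hp : pat.toList ≠ []) (idx : Nat)
    (hidx : idx ≤ sequence.toList.length) (o : Int) (rest : List Int)
    (h : (pattern_find_occs sequence pat).filter (fun o => decide ((idx : Int) ≤ o)) = o :: rest) :
    PySem.Chars.findFrom sequence.toList pat.toList (idx : Int) none = o := by
  have ho : o ∈ (pattern_find_occs sequence pat).filter (fun o => decide ((idx : Int) ≤ o)) := by
    rw [h]; exact List.mem_cons_self ..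
  rw [List.mem_filter] at ho
  obtain ⟨homem, hole⟩ := ho
  have hole : (idx : Int) ≤ o := by simpa using hole
  obtain ⟨j, rfl, hjpre, hjlen⟩ := (mem_occs_iff sequence pat o).mp homem
  have hij : idx ≤ j := by exact_mod_cast hole
  -- findFrom does not return -1
  have hne : PySem.Chars.findFrom sequence.toList pat.toList (idx : Int) none ≠ -1 := by
    intro heq
    apply (PySem.Chars.findFrom_natCast_eq_neg_one_iff _ _ idx hidx).mp heq
    apply (PySem.Chars.isIn_iff_infix _ _).mp
    apply (PySem.Chars.exists_prefix_drop_iff_isIn _ _).mp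
    exact ⟨j - idx, by rw [List.drop_drop]; rwa [show idx + (j - idx) = j by omega]⟩
  obtain ⟨hkr, hrpre, hrmin⟩ :=
    PySem.Chars.findFrom_natCast_spec sequence.toList pat.toList idx hidx hne
  set r : Int := PySem.Chars.findFrom sequence.toList pat.toList (idx : Int) none with hr
  have hr0 : 0 ≤ r := le_trans (by exact_mod_cast Nat.zero_le idx) hkr
  have hplen : 1 ≤ pat.toList.length := by
    cases hq : pat.toList with
    | nil => exact absurd hq hp
    | cons a l => simp [hq]
  have hrlen : pat.toList.length ≤ sequence.toList.length - r.toNat := by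
    simpa using hrpre.length_le
  -- r is itself an element of the filtered list
  have hrmem : r ∈ (pattern_find_occs sequence pat).filter (fun o => decide ((idx : Int) ≤ o)) := by
    rw [List.mem_filter]
    constructor
    · rw [mem_occs_iff]
      exact ⟨r.toNat, (Int.toNat_of_nonneg hr0).symm, hrpre, by omega⟩
    · simpa using hkr
  -- minimality: r ≤ o
  have hro : r ≤ (j : Int) := by
    by_contra hlt
    push_neg at hlt
    have hjr : j < r.toNat := by omega
    exact hrmin j hij hjr hjpre
  -- head-minimality: o ≤ r
  have hpw : ((j : Int) :: rest).Pairwise (· < ·) := by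
    rw [← h]; exact (occs_pairwise sequence pat).filter _
  rw [h] at hrmem
  rcases List.mem_cons.mp hrmem with heq | hmem
  · exact heq
  · have : (j : Int) < r := List.rel_of_pairwise_cons hpw hmem
    omega

-- B's loop ignores leading elements below the current end pointer
lemma loopB_dropWhile (L : Int) (l : List Int) (best count e : Int) :
    pattern_find_loopB L l best count e
      = pattern_find_loopB L (l.dropWhile (fun o => decide (o < e))) best count e := by
  induction l with
  | nil => simp [List.dropWhile]
  | cons o rest ih =>
    by_cases hc : o < e
    · rw [List.dropWhile_cons_of_pos (by simpa using hc)]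
      rw [← ih]
      simp [pattern_find_loopB, hc]
    · rw [List.dropWhile_cons_of_neg (by simpa using hc)]

-- on a strictly increasing list, dropWhile (< e) = filter (e ≤ ·)
lemma dropWhile_eq_filter (l : List Int) (e : Int) (hl : l.Pairwise (· < ·)) :
    l.dropWhile (fun o => decide (o < e)) = l.filter (fun o => decide (e ≤ o)) := by
  induction l with
  | nil => simp
  | cons a rest ih =>
    rw [List.pairwise_cons] at hl
    by_cases hc : a < e
    · rw [List.dropWhile_cons_of_pos (by simpa using hc),
        List.filter_cons_of_neg (by simpa using hc)]
      exact ih hl.2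
    · rw [List.dropWhile_cons_of_neg (by simpa using hc),
        List.filter_cons_of_pos (by simpa using hc)]
      congr 1
      symm
      rw [List.filter_eq_self]
      intro b hb
      have := hl.1 b hb
      simp; omega

-- the main simulation: A's loop state idx corresponds to B's fold over occurrences ≥ idx
lemma main_sim (sequence pat : String) (hp : pat.toList ≠ []) :
    ∀ (fuel : Nat) (idx : Nat) (count maxc : Int), idx ≤ sequence.toList.length →
      sequence.toList.length - idx < fuel →
      pattern_find_loopA sequence pat (PySem.Str.len pat) fuel (idx : Int) count maxc
        = pattern_find_loopB (PySem.Str.len pat)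
            ((pattern_find_occs sequence pat).filter (fun o => decide ((idx : Int) ≤ o)))
            maxc count (idx : Int) := by
  intro fuel
  induction fuel with
  | zero => intro idx count maxc h1 h2; omega
  | succ fuel ih =>
    intro idx count maxc hidx hfuel
    have hplen : 1 ≤ pat.toList.length := by
      cases hq : pat.toList with
      | nil => exact absurd hq hp
      | cons a l => simp [hq]
    cases hF : (pattern_find_occs sequence pat).filter (fun o => decide ((idx : Int) ≤ o)) with
    | nil =>
      have hfind : PySem.Chars.findFrom sequence.toList pat.toList (idx : Int) none = -1 :=
        findFrom_eq_neg_one sequence pat hp idx hidx hF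
      simp only [pattern_find_loopA, PySem.Str.findFrom_eq, hfind]
      have h1 : ¬ ((-1 : Int) = (idx : Int)) := by omega
      rw [if_neg h1]
      simp only [if_true, pattern_find_loopB]
      split <;> omega
    | cons o rest =>
      have hfind : PySem.Chars.findFrom sequence.toList pat.toList (idx : Int) none = o :=
        findFrom_eq_head sequence pat hp idx hidx o rest hF
      have ho : o ∈ (pattern_find_occs sequence pat).filter (fun o => decide ((idx : Int) ≤ o)) := by
        rw [hF]; exact List.mem_cons_self ..
      rw [List.mem_filter] at ho
      obtain ⟨homem, hole⟩ := ho
      have hole : (idx : Int) ≤ o := by simpa using hole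
      obtain ⟨j, rfl, hjpre, hjlen⟩ := (mem_occs_iff sequence pat o).mp homem
      have hij : idx ≤ j := by exact_mod_cast hole
      have hpwtail : rest.Pairwise (· < ·) := by
        have hpw : ((j : Int) :: rest).Pairwise (· < ·) := by
          rw [← hF]; exact (occs_pairwise sequence pat).filter _
        exact (List.pairwise_cons.mp hpw).2
      -- common rewriting of the tail of the fold:
      -- occurrences ≥ j + L are exactly rest with its leading (< j + L) part skipped
      have htail : ∀ best' count' : Int,
          pattern_find_loopB (PySem.Str.len pat) rest best' count'
              (((j + pat.toList.length : Nat) : Int))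
            = pattern_find_loopB (PySem.Str.len pat)
                ((pattern_find_occs sequence pat).filter
                  (fun o => decide ((((j + pat.toList.length : Nat) : Int)) ≤ o)))
                best' count' (((j + pat.toList.length : Nat) : Int)) := by
        intro best' count'
        rw [loopB_dropWhile, dropWhile_eq_filter _ _ hpwtail]
        congr 1
        -- rest.filter (j+L ≤ ·) = occs.filter (j+L ≤ ·)
        have h1 : (pattern_find_occs sequence pat).filter
              (fun o => decide ((((j + pat.toList.length : Nat) : Int)) ≤ o))
            = ((pattern_find_occs sequence pat).filter (fun o => decide ((idx : Int) ≤ o))).filter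
              (fun o => decide ((((j + pat.toList.length : Nat) : Int)) ≤ o)) := by
          rw [List.filter_filter]
          apply List.filter_congr
          intro x hx
          by_cases h2 : (((j + pat.toList.length : Nat) : Int)) ≤ x
          · have h3 : (idx : Int) ≤ x := by
              have : (idx : Int) ≤ ((j + pat.toList.length : Nat) : Int) := by push_cast; omega
              omega
            simp [h2, h3]
          · simp [h2]
            intro h4
            omega
        rw [h1, hF, List.filter_cons_of_neg (by simp only [decide_eq_true_eq]; push_cast; omega)]
      by_cases hcase : j = idx
      · subst hcase
        -- the pattern repeats exactly at idx
        simp only [pattern_find_loopA, PySem.Str.findFrom_eq, hfind]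
        simp only [if_true, if_pos rfl]
        have hcast : (j : Int) + PySem.Str.len pat = ((j + pat.toList.length : Nat) : Int) := by
          rw [PySem.Str.len_eq]; push_cast; ring
        rw [hcast, ih (j + pat.toList.length) (count + 1) maxc (by omega) (by omega)]
        conv_lhs => rw [← htail maxc (count + 1)]
        simp only [pattern_find_loopB]
        simp only [if_true]
        rw [hcast, if_neg (lt_irrefl ((j : Int)))]
      · -- first occurrence is strictly after idx: reset the run
        have hjgt : idx < j := by omega
        simp only [pattern_find_loopA, PySem.Str.findFrom_eq, hfind]
        rw [if_neg (by simp; omega), if_neg (by omega)]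
        have hcast : (j : Int) + PySem.Str.len pat = ((j + pat.toList.length : Nat) : Int) := by
          rw [PySem.Str.len_eq]; push_cast; ring
        rw [hcast, ih (j + pat.toList.length) 1 (if count > maxc then count else maxc)
          (by omega) (by omega)]
        conv_lhs => rw [← htail (if count > maxc then count else maxc) 1]
        simp only [pattern_find_loopB]
        have hlt2 : ¬ ((j : Int) < (idx : Int)) := by omega
        have heq2 : ¬ ((j : Int) = (idx : Int)) := by omega
        rw [if_neg hlt2, if_neg heq2, hcast]
        congr 1
        split <;> omega

-- ===== VERDICT (by name: the statement is the Claim_ definition above) =====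
theorem pattern_find_spec : Claim_equal_pattern_find := by
  intro sequence pat _ hpre
  unfold Spec_pattern_find
  have hp : pat.toList ≠ [] := by
    intro h
    exact hpre (by rwa [String.toList_eq_nil_iff] at h)
  have hmain := main_sim sequence pat hp (sequence.toList.length + 2) 0 0 0
    (by omega) (by omega)
  have hfilter : (pattern_find_occs sequence pat).filter (fun o => decide ((0 : Int) ≤ o))
      = pattern_find_occs sequence pat := by
    rw [List.filter_eq_self]
    intro o ho
    obtain ⟨j, rfl, -, -⟩ := (mem_occs_iff sequence pat o).mp ho
    simp
  unfold pattern_find pattern_find_alt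
  have hlen : (PySem.Str.len sequence).toNat = sequence.toList.length := by
    rw [PySem.Str.len_eq]; omega
  rw [hlen]
  simpa [hfilter] using hmain
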